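-- pv_equiv track=rewrite | github.com/hakandundar34coding/system-monitoring-center | src/ServicesGetMultProc.py | services_unit_files_command_split_func
-- ===== SOURCE A (Python) =====
-- def services_unit_files_command_split_func(number_of_cpu_cores_used, unit_files_command):
--
--     # Get service list and unit file command parameters.
--     service_list = unit_files_command[3:]
--     unit_files_command = unit_files_command[:3]
--
--     # Get number of services per process.
--     number_of_services_per_process = len(service_list) // number_of_cpu_cores_used
--     remaining_services = len(service_list) % number_of_cpu_cores_used
--
--     # Split service list per process.
--     service_list_split = []
--     for i in range(number_of_cpu_cores_used):
--         service_list_split.append(service_list[i*number_of_services_per_process:(i+1)*number_of_services_per_process])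
--
--     # Add the remaining services into the last list.
--     if remaining_services != 0:
--         for service in service_list[-remaining_services:]:
--             service_list_split[-1].append(service)
--
--     # Also add the command parameters to the beginning of the all service lists to use them as commands.
--     unit_files_command_split = []
--     for service_list_data in service_list_split:
--         unit_files_command_scratch = list(unit_files_command)
--         for service in service_list_data:
--             unit_files_command_scratch.append(service)
--         unit_files_command_split.append(unit_files_command_scratch)
--
--     return unit_files_command_split
-- ===== SOURCE B (Python) =====
-- def services_unit_files_command_split_func(number_of_cpu_cores_used, unit_files_command):
--     prefix = unit_files_command[:3]
--     services = unit_files_command[3:]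
--     n = len(services) // number_of_cpu_cores_used
--     it = iter(services)
--     out = []
--     for i in range(number_of_cpu_cores_used):
--         if i < number_of_cpu_cores_used - 1:
--             out.append(prefix + [next(it) for _ in range(n)])
--         else:
--             out.append(prefix + list(it))
--     return out
-- ===== Notes on version B (the rewrite author's own statement) =====
-- stated objective: alternative
-- what changed: B replaces A's three staged passes (index-sliced chunking loop, remainder-dumping loop, prefix-prepending loop) with a single pass that consumes the service list through an iterator, emitting each prefixed chunk of n items as it goes and letting the last iteration drain whatever remains.
import Mathlib
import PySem

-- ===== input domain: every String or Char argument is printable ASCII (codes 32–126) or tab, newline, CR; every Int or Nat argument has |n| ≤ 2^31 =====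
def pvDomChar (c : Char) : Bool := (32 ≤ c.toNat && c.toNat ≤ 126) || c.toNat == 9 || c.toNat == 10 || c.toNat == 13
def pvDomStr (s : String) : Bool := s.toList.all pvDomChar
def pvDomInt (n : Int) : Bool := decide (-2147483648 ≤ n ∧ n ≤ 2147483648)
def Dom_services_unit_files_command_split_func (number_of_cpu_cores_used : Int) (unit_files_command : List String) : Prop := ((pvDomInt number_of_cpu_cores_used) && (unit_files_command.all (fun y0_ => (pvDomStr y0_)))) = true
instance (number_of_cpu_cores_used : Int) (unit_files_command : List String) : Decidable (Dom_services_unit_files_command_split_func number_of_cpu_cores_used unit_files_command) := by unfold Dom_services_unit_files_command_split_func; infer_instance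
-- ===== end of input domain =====

-- B replaces A's three staged passes (index-sliced chunking, remainder-dumping, prefix-prepending)
-- by one pass that CONSUMES the service list through an iterator (modelled here as a remaining-list
-- state), emitting each prefixed chunk as it goes; objective: alternative (sequential consumption
-- instead of index arithmetic).


-- ===== PORT A =====
def services_unit_files_command_split_func (number_of_cpu_cores_used : Int) (unit_files_command : List String) : List (List String) :=
  let service_list := PySem.List.slice unit_files_command (some 3) none
  let unit_files_command := PySem.List.slice unit_files_command none (some 3)
  match PySem.Int.divmod? (service_list.length : Int) number_of_cpu_cores_used with
  | none => []  -- cores = 0: Python raises ZeroDivisionError; excluded by Pre_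
  | some (number_of_services_per_process, remaining_services) =>
    let service_list_split : List (List String) :=
      (PySem.List.pyRange 0 number_of_cpu_cores_used 1).map (fun i =>
        PySem.List.slice service_list (some (i * number_of_services_per_process))
          (some ((i + 1) * number_of_services_per_process)))
    let service_list_split :=
      if remaining_services ≠ 0 then
        match service_list_split.getLast? with
        | none => service_list_split  -- service_list_split[-1]: Python raises IndexError; excluded by Pre_
        | some last =>
          service_list_split.dropLast ++
            [last ++ PySem.List.slice service_list (some (-remaining_services)) none]
      else service_list_split
    service_list_split.map (fun service_list_data => unit_files_command ++ service_list_data)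

-- ===== PORT B =====
def services_unit_files_command_split_func_alt (number_of_cpu_cores_used : Int) (unit_files_command : List String) : List (List String) :=
  let pfx := PySem.List.slice unit_files_command none (some 3)
  let rest0 := PySem.List.slice unit_files_command (some 3) none
  let n := PySem.Int.floordiv (rest0.length : Int) number_of_cpu_cores_used
  ((PySem.List.pyRange 0 number_of_cpu_cores_used 1).foldl
    (fun (st : List (List String) × List String) i =>
      if i < number_of_cpu_cores_used - 1 then
        (st.1 ++ [pfx ++ PySem.List.slice st.2 none (some n)],
         PySem.List.slice st.2 (some n) none)
      else
        (st.1 ++ [pfx ++ st.2], ([] : List String)))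
    (([] : List (List String)), rest0)).1

-- ===== PRECONDITION & SPEC =====
-- Pre_ excludes exactly the inputs where Python A raises: cores = 0 (ZeroDivisionError) and
-- cores < 0 with a nonzero remainder r = len % cores whose slice service_list[-r:] is nonempty
-- (then service_list_split[-1] on the empty split list raises IndexError).
def Pre_services_unit_files_command_split_func (number_of_cpu_cores_used : Int) (unit_files_command : List String) : Prop :=
  0 < number_of_cpu_cores_used ∨
    (number_of_cpu_cores_used < 0 ∧
      (PySem.Int.mod ((unit_files_command.length - 3 : Nat) : Int) number_of_cpu_cores_used = 0 ∨
        ((unit_files_command.length - 3 : Nat) : Int) ≤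
          -(PySem.Int.mod ((unit_files_command.length - 3 : Nat) : Int) number_of_cpu_cores_used)))
instance (number_of_cpu_cores_used : Int) (unit_files_command : List String) : Decidable (Pre_services_unit_files_command_split_func number_of_cpu_cores_used unit_files_command) := by unfold Pre_services_unit_files_command_split_func; infer_instance
def pvWitness_services_unit_files_command_split_func : Int × List String := (2, ["s", "p", "C", "a", "b", "c", "d", "e"])

def Spec_services_unit_files_command_split_func (number_of_cpu_cores_used : Int) (unit_files_command : List String) (out : List (List String)) : Prop := out = services_unit_files_command_split_func_alt number_of_cpu_cores_used unit_files_command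
instance (number_of_cpu_cores_used : Int) (unit_files_command : List String) (out : List (List String)) : Decidable (Spec_services_unit_files_command_split_func number_of_cpu_cores_used unit_files_command out) := by unfold Spec_services_unit_files_command_split_func; infer_instance

-- ===== CLAIM (what is proved, stated in full; the proofs are below) =====
def Claim_equal_services_unit_files_command_split_func : Prop := ∀ (number_of_cpu_cores_used : Int) (unit_files_command : List String), Dom_services_unit_files_command_split_func number_of_cpu_cores_used unit_files_command → Pre_services_unit_files_command_split_func number_of_cpu_cores_used unit_files_command → Spec_services_unit_files_command_split_func number_of_cpu_cores_used unit_files_command (services_unit_files_command_split_func number_of_cpu_cores_used unit_files_command)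

-- ===== LEMMAS AND PROOFS =====

-- Common closed form both ports are reduced to (positive-cores case).
def pvSpine (pfx : List String) (s : List String) (t n : Nat) : List (List String) :=
  (List.range (t + 1)).map (fun k => pfx ++ if k < t then (s.drop (k * n)).take n else s.drop (k * n))

theorem a_nonpos (c : Int) (uf : List String) (hc : c ≤ 0) : services_unit_files_command_split_func c uf = [] := by
  simp only [services_unit_files_command_split_func]
  rw [PySem.List.pyRange_one_eq_nil hc]
  cases h : PySem.Int.divmod? ((PySem.List.slice uf (some 3) none).length : Int) c with
  | none => simp
  | some p => simp

theorem b_nonpos (c : Int) (uf : List String) (hc : c ≤ 0) : services_unit_files_command_split_func_alt c uf = [] := by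
  simp only [services_unit_files_command_split_func_alt]
  rw [PySem.List.pyRange_one_eq_nil hc]
  simp [List.foldl]

lemma slice_chunk (s : List String) (k n : Nat) :
    PySem.List.slice s (some ((k : Int) * (n : Int))) (some (((k : Int) + 1) * (n : Int))) =
      (s.drop (k * n)).take n := by
  have h1 : ((k : Int) * n) = ((k * n : Nat) : Int) := by push_cast; ring
  have h2 : (((k : Int) + 1) * n) = (((k * n + n : Nat)) : Int) := by push_cast; ring
  rw [h1, h2, PySem.List.slice_natCast]
  congr 1
  omega

lemma nat_key (pfx : List String) (s : List String) (t n : Nat) (tail : List String)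
    (hL : s.length = (t + 1) * n + s.length % (t + 1))
    (htail : s.length % (t + 1) ≠ 0 → tail = s.drop (s.length - s.length % (t + 1))) :
    List.map (fun d => pfx ++ d)
      (if s.length % (t + 1) ≠ 0 then
        match ((List.range (t + 1)).map (fun k => (s.drop (k * n)).take n)).getLast? with
        | none => (List.range (t + 1)).map (fun k => (s.drop (k * n)).take n)
        | some last =>
          ((List.range (t + 1)).map (fun k => (s.drop (k * n)).take n)).dropLast ++
            [last ++ tail]
      else (List.range (t + 1)).map (fun k => (s.drop (k * n)).take n)) =
    pvSpine pfx s t n := by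
  unfold pvSpine
  have hrange : List.range (t + 1) = List.range t ++ [t] := List.range_succ
  have hL' : s.length = t * n + n + s.length % (t + 1) := by
    conv_lhs => rw [hL, Nat.succ_mul]
  have hlast : pfx ++ s.drop (t * n) =
      pfx ++ ((s.drop (t * n)).take n ++ s.drop (s.length - s.length % (t + 1))) := by
    have hd : s.length - s.length % (t + 1) = t * n + n := by
      clear hL; omega
    rw [hd, ← List.drop_drop, List.take_append_drop]
  by_cases h0 : s.length % (t + 1) = 0
  · simp only [h0, ne_eq, not_true_eq_false, if_false, hrange]
    simp only [List.map_append, List.map_map, List.map_cons, List.map_nil]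
    congr 1
    · apply List.map_congr_left
      intro k hk
      simp [List.mem_range.mp hk]
    · have hlen : (s.drop (t * n)).length ≤ n := by
        simp only [List.length_drop]
        omega
      simp [List.take_of_length_le hlen]
  · rw [htail h0]
    simp only [ne_eq, h0, not_false_eq_true, if_true, hrange]
    rw [List.map_append]
    simp only [List.map_cons, List.map_nil]
    rw [List.getLast?_concat, List.dropLast_concat]
    simp only [List.map_append, List.map_map, List.map_cons, List.map_nil]
    congr 1
    · apply List.map_congr_left
      intro k hk
      simp [List.mem_range.mp hk]
    · simp only [List.singleton_inj, if_false, lt_irrefl]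
      exact hlast.symm

theorem a_pos (t : Nat) (uf : List String) :
    services_unit_files_command_split_func ((t + 1 : Nat) : Int) uf =
      pvSpine (PySem.List.slice uf none (some 3)) (PySem.List.slice uf (some 3) none) t
        ((PySem.List.slice uf (some 3) none).length / (t + 1)) := by
  have hc0 : ((t + 1 : Nat) : Int) ≠ 0 := by exact_mod_cast (Nat.succ_ne_zero t)
  simp only [services_unit_files_command_split_func]
  rw [PySem.Int.divmod?]
  simp only [hc0, if_false]
  generalize PySem.List.slice uf none (some 3) = pfx
  generalize hs : PySem.List.slice uf (some 3) none = s
  rw [PySem.List.pyRange_one]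
  simp only [sub_zero, Int.toNat_natCast, zero_add, List.map_map]
  have hfd : ((s.length : Int)).fdiv ((t + 1 : Nat) : Int) = ((s.length / (t + 1) : Nat) : Int) :=
    PySem.Int.floordiv_natCast s.length (t + 1)
  have hfm : ((s.length : Int)).fmod ((t + 1 : Nat) : Int) = ((s.length % (t + 1) : Nat) : Int) :=
    PySem.Int.mod_natCast s.length (t + 1)
  rw [hfd, hfm]
  simp only [Function.comp_def, slice_chunk]
  simp only [ne_eq, Nat.cast_eq_zero]
  exact nat_key pfx s t (s.length / (t + 1)) _
    (Nat.div_add_mod s.length (t + 1)).symm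
    (fun h0 => PySem.List.slice_from_neg_natCast s (s.length % (t + 1)) (Nat.pos_of_ne_zero h0))

-- Invariant of B's consuming fold: starting at chunk k with the yet-unconsumed services `rest`,
-- the fold appends one prefixed chunk per remaining index, the last absorbing everything.
lemma fold_inv (pfx : List String) (n t : Nat) :
    ∀ (m k : Nat) (rest : List String) (out : List (List String)), k + m = t + 1 →
    ((List.range' k m).foldl
      (fun (st : List (List String) × List String) j =>
        if j < t then (st.1 ++ [pfx ++ st.2.take n], st.2.drop n)
        else (st.1 ++ [pfx ++ st.2], ([] : List String)))
      (out, rest)).1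
    = out ++ (List.range' k m).map
        (fun j => pfx ++ if j < t then (rest.drop ((j - k) * n)).take n else rest.drop ((j - k) * n)) := by
  intro m
  induction m with
  | zero => intro k rest out _; simp
  | succ m ih =>
    intro k rest out hk
    rw [List.range'_succ]
    by_cases hkt : k < t
    · simp only [List.foldl_cons, hkt, if_true]
      rw [ih (k + 1) (rest.drop n) (out ++ [pfx ++ rest.take n]) (by omega)]
      simp only [List.map_cons, hkt, if_true, Nat.sub_self, Nat.zero_mul, List.drop_zero,
        List.append_assoc, List.singleton_append]
      congr 2
      apply List.map_congr_left
      intro j hj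
      have hj' : k + 1 ≤ j := (List.mem_range'_1.mp hj).1
      have hdd : (rest.drop n).drop ((j - (k + 1)) * n) = rest.drop ((j - k) * n) := by
        rw [List.drop_drop]
        congr 1
        have : j - k = (j - (k + 1)) + 1 := by omega
        rw [this, Nat.succ_mul]
        omega
      rw [hdd]
    · have hk' : k = t := by omega
      have hm : m = 0 := by omega
      subst hk' hm
      simp

theorem b_pos (t : Nat) (uf : List String) :
    services_unit_files_command_split_func_alt ((t + 1 : Nat) : Int) uf =
      pvSpine (PySem.List.slice uf none (some 3)) (PySem.List.slice uf (some 3) none) t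
        ((PySem.List.slice uf (some 3) none).length / (t + 1)) := by
  simp only [services_unit_files_command_split_func_alt]
  generalize PySem.List.slice uf none (some 3) = pfx
  generalize hs : PySem.List.slice uf (some 3) none = s
  have hfd : PySem.Int.floordiv ((s.length : Int)) ((t + 1 : Nat) : Int) =
      ((s.length / (t + 1) : Nat) : Int) := PySem.Int.floordiv_natCast s.length (t + 1)
  rw [hfd]
  rw [PySem.List.pyRange_one]
  simp only [sub_zero, Int.toNat_natCast, zero_add]
  rw [List.foldl_map]
  have hlast : ((t + 1 : Nat) : Int) - 1 = (t : Int) := by push_cast; ring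
  have hfun : (fun (st : List (List String) × List String) (j : Nat) =>
      if ((j : Int)) < ((t + 1 : Nat) : Int) - 1 then
        (st.1 ++ [pfx ++ PySem.List.slice st.2 none (some ((s.length / (t + 1) : Nat) : Int))],
         PySem.List.slice st.2 (some ((s.length / (t + 1) : Nat) : Int)) none)
      else (st.1 ++ [pfx ++ st.2], ([] : List String))) =
      (fun (st : List (List String) × List String) (j : Nat) =>
        if j < t then (st.1 ++ [pfx ++ st.2.take (s.length / (t + 1))], st.2.drop (s.length / (t + 1)))
        else (st.1 ++ [pfx ++ st.2], ([] : List String))) := by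
    funext st j
    rw [hlast, PySem.List.slice_to_natCast, PySem.List.slice_from_natCast]
    by_cases h : j < t
    · simp [h, Int.ofNat_lt.mpr h]
    · have : ¬ ((j : Int) < (t : Int)) := by exact_mod_cast h
      simp [h, this]
  rw [hfun, List.range_eq_range']
  rw [fold_inv pfx (s.length / (t + 1)) t (t + 1) 0 s [] (by omega)]
  unfold pvSpine
  rw [List.range_eq_range']
  simp

-- ===== VERDICT (by name: the statement is the Claim_ definition above) =====
theorem services_unit_files_command_split_func_spec : Claim_equal_services_unit_files_command_split_func := by
  intro c uf _ _
  unfold Spec_services_unit_files_command_split_func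
  by_cases hc : c ≤ 0
  · rw [a_nonpos c uf hc, b_nonpos c uf hc]
  · rw [not_le] at hc
    obtain ⟨t, rfl⟩ : ∃ t : Nat, c = ((t + 1 : Nat) : Int) :=
      ⟨c.toNat - 1, by omega⟩
    rw [a_pos t uf, b_pos t uf]
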